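-- pv_equiv track=rewrite | github.com/angiekim05/Algorithm | 프로그래머스/2/250136. ［PCCP 기출문제］ 2번 ／ 석유 시추/［PCCP 기출문제］ 2번 ／ 석유 시추.py | solution
-- ===== SOURCE A (Python) =====
-- def solution(land):
--     n,m = len(land), len(land[0])
--     answer = [0]*m
--     visited = [[0]*m for _ in range(n)]
--
--     def in_range(x,y):
--         return 0<=x<n and 0<=y<m
--
--     for i in range(n):
--         for j in range(m):
--             if not visited[i][j] and land[i][j] == 1:
--                 visited[i][j] = 1
--                 col = set([j])
--                 s = [(i,j)]
--                 cnt = 1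
--
--                 while s:
--                     x,y = s.pop()
--                     for dx,dy in [(0,1),(0,-1),(1,0),(-1,0)]:
--                         nx,ny = x+dx,y+dy
--                         if not in_range(nx,ny):
--                             continue
--                         if visited[nx][ny]:
--                             continue
--                         if land[nx][ny] == 0:
--                             continue
--                         visited[nx][ny] = 1
--                         cnt += 1
--                         s.append((nx,ny))
--                         col.add(ny)
--
--                 for c in col:
--                     answer[c] += cnt
--
--     return max(answer)
-- ===== SOURCE B (Python) =====
-- def solution(land):
--     n, m = len(land), len(land[0])
--
--     def closure(i, j):
--         comp = {(i, j)}
--         frontier = {(i, j)}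
--         while frontier:
--             new = set()
--             for (x, y) in frontier:
--                 for (nx, ny) in ((x, y + 1), (x, y - 1), (x + 1, y), (x - 1, y)):
--                     if 0 <= nx < n and 0 <= ny < m and land[nx][ny] != 0 and (nx, ny) not in comp:
--                         comp.add((nx, ny))
--                         new.add((nx, ny))
--             frontier = new
--         return comp
--
--     comps = []          # (size, columns) of each component holding a 1-cell
--     done = set()
--     for i in range(n):
--         for j in range(m):
--             if land[i][j] == 1 and (i, j) not in done:
--                 comp = closure(i, j)
--                 done |= comp
--                 comps.append((len(comp), {y for (_, y) in comp}))
--     answer = [sum(size for (size, cols) in comps if c in cols) for c in range(m)]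
--     return max(answer)
-- ===== Notes on version B (the rewrite author's own statement) =====
-- stated objective: alternative
-- what changed: Replaces the stack-based DFS flood fill with a shared mutable visited matrix and in-place answer-array accumulation by a frontier-set BFS closure per component, collecting (size, column-set) records into a list and computing each column's answer afterwards as a sum over the collected components.
import Mathlib
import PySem

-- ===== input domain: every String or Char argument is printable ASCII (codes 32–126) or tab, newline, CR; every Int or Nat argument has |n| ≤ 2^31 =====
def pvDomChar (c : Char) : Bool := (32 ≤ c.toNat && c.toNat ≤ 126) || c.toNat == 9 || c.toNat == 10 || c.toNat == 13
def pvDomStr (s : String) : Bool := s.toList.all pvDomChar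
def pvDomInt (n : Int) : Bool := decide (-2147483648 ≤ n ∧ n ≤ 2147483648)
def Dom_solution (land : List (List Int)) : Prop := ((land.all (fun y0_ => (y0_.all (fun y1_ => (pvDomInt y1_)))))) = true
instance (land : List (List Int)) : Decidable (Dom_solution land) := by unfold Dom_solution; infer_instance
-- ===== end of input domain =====

-- B replaces A's stack-DFS flood fill (shared visited matrix, in-place answer array) by a
-- frontier-set BFS closure per component plus a final per-column summation; objective: alternative
-- (same asymptotic cost). Neither program mutates its argument.


-- ===== PORT A =====
-- shared indexing helpers (both Pythons compute n, m and index land the same way); under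
-- Pre_ every access both programs perform is in range, so the getD defaults are never hit.
def landAt (land : List (List Int)) (i j : Int) : Int :=
  PySem.List.pyGetD (PySem.List.pyGetD land i []) j 0

-- port of A's in_range(x, y)
def inR (n m x y : Int) : Bool :=
  decide (0 ≤ x) && decide (x < n) && decide (0 ≤ y) && decide (y < m)

-- A's mutable DFS state: the 0/1 matrix `visited` is ported as the set of marked cells
-- (exact: the matrix is that set's characteristic function), the stack with its top first.
structure DState where
  visited : Finset (Int × Int)
  stack   : List (Int × Int)
  cnt     : Int
  col     : Finset Int

-- the n×m index rectangle (proof device for the termination measure)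
def gridCells (n m : Int) : Finset (Int × Int) :=
  ((Finset.range n.toNat) ×ˢ (Finset.range m.toNat)).image (fun p => ((p.1 : Int), (p.2 : Int)))

-- termination measure of A's while loop
def dMu (n m : Int) (s : DState) : Nat :=
  2 * ((gridCells n m) \ s.visited).card + s.stack.length

-- one neighbour test of A's inner `for dx,dy in …` (conditions in A's order)
def dfsStep (land : List (List Int)) (n m : Int) (s : DState) (c : Int × Int) : DState :=
  if inR n m c.1 c.2 = true ∧ c ∉ s.visited ∧ landAt land c.1 c.2 ≠ 0 then
    ⟨insert c s.visited, c :: s.stack, s.cnt + 1, insert c.2 s.col⟩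
  else s

theorem dfsStep_mu (land : List (List Int)) (n m : Int) (s : DState) (c : Int × Int) :
    dMu n m (dfsStep land n m s c) ≤ dMu n m s := by
  unfold dfsStep dMu
  split
  · rename_i h
    have hc : c ∈ gridCells n m \ s.visited := by
      have hin := h.1
      simp only [inR, Bool.and_eq_true, decide_eq_true_eq] at hin
      simp only [gridCells, Finset.mem_sdiff, Finset.mem_image, Finset.mem_product,
        Finset.mem_range]
      refine ⟨⟨(c.1.toNat, c.2.toNat), ⟨by omega, by omega⟩, ?_⟩, h.2.1⟩
      simp only [Prod.ext_iff]; constructor <;> omega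
    have : (gridCells n m \ insert c s.visited) = (gridCells n m \ s.visited).erase c := by
      ext q; simp [Finset.mem_sdiff, Finset.mem_erase, and_comm]; tauto
    simp only [this, List.length_cons]
    have hcard : ((gridCells n m \ s.visited).erase c).card = (gridCells n m \ s.visited).card - 1 :=
      Finset.card_erase_of_mem hc
    have hpos : 0 < (gridCells n m \ s.visited).card := Finset.card_pos.mpr ⟨c, hc⟩
    omega
  · simp

-- port of A's `while s:` loop
def dfsLoop (land : List (List Int)) (n m : Int) (s : DState) : DState :=
  match hst : s.stack with
  | [] => s
  | c :: rest =>
    let s0 : DState := ⟨s.visited, rest, s.cnt, s.col⟩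
    let s1 := dfsStep land n m s0 (c.1, c.2 + 1)
    let s2 := dfsStep land n m s1 (c.1, c.2 - 1)
    let s3 := dfsStep land n m s2 (c.1 + 1, c.2)
    let s4 := dfsStep land n m s3 (c.1 - 1, c.2)
    dfsLoop land n m s4
termination_by dMu n m s
decreasing_by
  have h0 : dMu n m (⟨s.visited, rest, s.cnt, s.col⟩ : DState) < dMu n m s := by
    unfold dMu; rw [hst]; simp
  exact lt_of_le_of_lt
    ((dfsStep_mu land n m _ _).trans ((dfsStep_mu land n m _ _).trans
      ((dfsStep_mu land n m _ _).trans (dfsStep_mu land n m _ _)))) h0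

-- row-major enumeration of the two nested `for` ranges (shared: both Pythons loop identically)
def cellsOf (n m : Int) : List (Int × Int) :=
  (PySem.List.pyRange 0 n 1).flatMap (fun i => (PySem.List.pyRange 0 m 1).map (fun j => (i, j)))

-- A's `for c in col: answer[c] += cnt`: set-iteration order is unspecified, the additions
-- commute, so the resulting list is ported exactly by iterating in sorted order.
def addCols (answer : List Int) (cnt : Int) (col : Finset Int) : List Int :=
  (col.sort (· ≤ ·)).foldl
    (fun ans c => PySem.List.pySetD ans c (PySem.List.pyGetD ans c 0 + cnt)) answer

-- A's outer loop body at one cell (i, j)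
def aStep (land : List (List Int)) (n m : Int) (st : Finset (Int × Int) × List Int)
    (ij : Int × Int) : Finset (Int × Int) × List Int :=
  if ij ∉ st.1 ∧ landAt land ij.1 ij.2 = 1 then
    let f := dfsLoop land n m ⟨insert ij st.1, [ij], 1, {ij.2}⟩
    (f.visited, addCols st.2 f.cnt f.col)
  else st

def solution (land : List (List Int)) : Int :=
  let n : Int := (land.length : Int)
  let m : Int := ((PySem.List.pyGetD land 0 []).length : Int)
  let fin := (cellsOf n m).foldl (aStep land n m) (∅, List.replicate m.toNat 0)
  (PySem.List.max? fin.2 (fun x => x)).getD 0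

-- ===== PORT B =====
-- the four neighbours of a cell that are in range and hold oil (Source B's inner double loop test)
def nbrsOil (land : List (List Int)) (n m : Int) (p : Int × Int) : List (Int × Int) :=
  [(p.1, p.2 + 1), (p.1, p.2 - 1), (p.1 + 1, p.2), (p.1 - 1, p.2)].filter
    (fun q => inR n m q.1 q.2 && !(landAt land q.1 q.2 == 0))

-- Source B's `while frontier:` loop; each round adds exactly the unseen oil neighbours of the
-- frontier.  Fuel n*m+1 is enough: comp grows inside the n×m grid every non-final round
-- (proved in closeLoop_spec below), so the port computes exactly the Python while loop.
def closeLoop (land : List (List Int)) (n m : Int) :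
    Nat → Finset (Int × Int) → Finset (Int × Int) → Finset (Int × Int)
  | 0, comp, _ => comp
  | fuel + 1, comp, frontier =>
    if frontier = ∅ then comp
    else
      let nw := (frontier.biUnion (fun p => (nbrsOil land n m p).toFinset)) \ comp
      closeLoop land n m fuel (comp ∪ nw) nw

def bClosure (land : List (List Int)) (n m : Int) (p : Int × Int) : Finset (Int × Int) :=
  closeLoop land n m (n.toNat * m.toNat + 1) {p} {p}

-- B's outer loop body at one cell (i, j)
def bStep (land : List (List Int)) (n m : Int)
    (st : Finset (Int × Int) × List (Int × Finset Int)) (ij : Int × Int) :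
    Finset (Int × Int) × List (Int × Finset Int) :=
  if landAt land ij.1 ij.2 = 1 ∧ ij ∉ st.1 then
    let K := bClosure land n m ij
    (st.1 ∪ K, st.2 ++ [((K.card : Int), K.image Prod.snd)])
  else st

def solution_alt (land : List (List Int)) : Int :=
  let n : Int := (land.length : Int)
  let m : Int := ((PySem.List.pyGetD land 0 []).length : Int)
  let scan := (cellsOf n m).foldl (bStep land n m) (∅, [])
  let answer := (PySem.List.pyRange 0 m 1).map (fun c =>
      (scan.2.map (fun sc => if c ∈ sc.2 then sc.1 else 0)).sum)
  (PySem.List.max? answer (fun x => x)).getD 0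

-- ===== PRECONDITION & SPEC =====
-- Pre_ excludes exactly the inputs on which the Python A raises: the empty grid and an empty
-- first row (IndexError on land[0][…] / ValueError on max([])), and grids where some row is
-- shorter than row 0 (IndexError on land[i][j], which A's full scan always reaches).
def Pre_solution (land : List (List Int)) : Prop :=
  land ≠ [] ∧ (land.headD []).length ≠ 0 ∧ ∀ row ∈ land, (land.headD []).length ≤ row.length
instance (land : List (List Int)) : Decidable (Pre_solution land) := by
  unfold Pre_solution; infer_instance

def pvWitness_solution : List (List Int) := [[1, 0, 1], [1, 2, 0], [0, 1, 1]]

def Spec_solution (land : List (List Int)) (out : Int) : Prop := out = solution_alt land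
instance (land : List (List Int)) (out : Int) : Decidable (Spec_solution land out) := by
  unfold Spec_solution; infer_instance

-- ===== CLAIM (what is proved, stated in full; the proofs are below) =====
def Claim_equal_solution : Prop :=
  ∀ (land : List (List Int)), Dom_solution land → Pre_solution land →
    Spec_solution land (solution land)


-- ===== LEMMAS AND PROOFS =====

-- ---- the oil-adjacency graph both programs explore ----
def Oil (land : List (List Int)) (n m : Int) (p : Int × Int) : Prop :=
  inR n m p.1 p.2 = true ∧ landAt land p.1 p.2 ≠ 0

def nbrs4 (p : Int × Int) : List (Int × Int) :=
  [(p.1, p.2 + 1), (p.1, p.2 - 1), (p.1 + 1, p.2), (p.1 - 1, p.2)]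

def Edge (land : List (List Int)) (n m : Int) (p q : Int × Int) : Prop :=
  Oil land n m p ∧ Oil land n m q ∧ q ∈ nbrs4 p

def Reach (land : List (List Int)) (n m : Int) (p q : Int × Int) : Prop :=
  Relation.ReflTransGen (Edge land n m) p q

theorem nbrs4_symm {p q : Int × Int} (h : q ∈ nbrs4 p) : p ∈ nbrs4 q := by
  simp only [nbrs4, List.mem_cons, List.not_mem_nil, or_false, Prod.ext_iff] at h ⊢
  omega

theorem edge_symm {land : List (List Int)} {n m : Int} {p q : Int × Int}
    (h : Edge land n m p q) : Edge land n m q p :=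
  ⟨h.2.1, h.1, nbrs4_symm h.2.2⟩

theorem reach_symm {land : List (List Int)} {n m : Int} {p q : Int × Int}
    (h : Reach land n m p q) : Reach land n m q p :=
  Relation.ReflTransGen.symmetric (fun _ _ hp => edge_symm hp) h

theorem reach_oil {land : List (List Int)} {n m : Int} {p q : Int × Int}
    (hp : Oil land n m p) (h : Reach land n m p q) : Oil land n m q := by
  induction h with
  | refl => exact hp
  | tail _ e _ => exact e.2.1

theorem reach_in_closed {land : List (List Int)} {n m : Int} {seed : Int × Int}
    (T : (Int × Int) → Prop) (hseed : T seed)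
    (hcl : ∀ a, T a → ∀ b, Edge land n m a b → T b)
    {q : Int × Int} (h : Reach land n m seed q) : T q := by
  induction h with
  | refl => exact hseed
  | tail h e ih => exact hcl _ ih _ e

theorem oil_mem_grid {land : List (List Int)} {n m : Int} {p : Int × Int}
    (h : Oil land n m p) : p ∈ gridCells n m := by
  obtain ⟨hin, -⟩ := h
  simp only [inR, Bool.and_eq_true, decide_eq_true_eq] at hin
  simp only [gridCells, Finset.mem_image, Finset.mem_product, Finset.mem_range]
  exact ⟨(p.1.toNat, p.2.toNat), ⟨by omega, by omega⟩, by simp [Prod.ext_iff]; omega⟩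

theorem mem_nbrsOil {land : List (List Int)} {n m : Int} {p q : Int × Int} :
    q ∈ nbrsOil land n m p ↔ q ∈ nbrs4 p ∧ Oil land n m q := by
  simp [nbrsOil, nbrs4, Oil, List.mem_filter]

-- ---- A's DFS: invariants of the while loop ----
def DCore (land : List (List Int)) (n m : Int) (V0 : Finset (Int × Int)) (seed : Int × Int)
    (s : DState) : Prop :=
  V0 ⊆ s.visited ∧ seed ∈ s.visited ∧
  (∀ q ∈ s.stack, q ∈ s.visited) ∧
  (∀ q ∈ s.stack, Reach land n m seed q) ∧
  (∀ q ∈ s.visited, q ∉ V0 → Reach land n m seed q) ∧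
  s.cnt = ((s.visited \ V0).card : Int) ∧
  s.col = (s.visited \ V0).image Prod.snd

def DClosed (land : List (List Int)) (n m : Int) (V0 : Finset (Int × Int)) (s : DState) : Prop :=
  ∀ q ∈ s.visited, q ∉ V0 → q ∉ s.stack →
    ∀ r, Oil land n m r → r ∈ nbrs4 q → r ∈ s.visited

theorem dfsStep_visited_mono (land : List (List Int)) (n m : Int) (s : DState) (c : Int × Int) :
    s.visited ⊆ (dfsStep land n m s c).visited := by
  unfold dfsStep; split <;> simp [Finset.subset_insert]

theorem dfsStep_stack_mono (land : List (List Int)) (n m : Int) (s : DState) (c : Int × Int) :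
    ∀ q ∈ s.stack, q ∈ (dfsStep land n m s c).stack := by
  unfold dfsStep; split <;> simp_all

theorem dfsStep_track (land : List (List Int)) (n m : Int) (s : DState) (c : Int × Int) :
    ∀ q ∈ (dfsStep land n m s c).visited, q ∈ s.visited ∨ q ∈ (dfsStep land n m s c).stack := by
  unfold dfsStep; split
  · intro q hq
    rcases Finset.mem_insert.mp hq with h | h
    · subst h; simp
    · exact Or.inl h
  · exact fun q hq => Or.inl hq

theorem dfsStep_nbr_in (land : List (List Int)) (n m : Int) (s : DState) (c : Int × Int)
    (h : Oil land n m c) : c ∈ (dfsStep land n m s c).visited := by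
  unfold dfsStep; split
  · exact Finset.mem_insert_self _ _
  · rename_i hneg
    by_contra hc
    exact hneg ⟨h.1, hc, h.2⟩

theorem dfsStep_core {land : List (List Int)} {n m : Int} {V0 : Finset (Int × Int)}
    {seed : Int × Int} (Hdisj : ∀ q, Reach land n m seed q → q ∉ V0)
    (hOil : Oil land n m seed) {s : DState} (hcore : DCore land n m V0 seed s)
    {parent : Int × Int} (hpar : Reach land n m seed parent) {c : Int × Int}
    (hc : c ∈ nbrs4 parent) : DCore land n m V0 seed (dfsStep land n m s c) := by
  obtain ⟨h1, h2, h3, h4, h5, h6, h7⟩ := hcore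
  unfold dfsStep
  split
  · rename_i hcond
    obtain ⟨hin, hnv, hnz⟩ := hcond
    have hOilc : Oil land n m c := ⟨hin, hnz⟩
    have hReachc : Reach land n m seed c :=
      hpar.tail ⟨reach_oil hOil hpar, hOilc, hc⟩
    have hcV0 : c ∉ V0 := Hdisj c hReachc
    have hsd : insert c s.visited \ V0 = insert c (s.visited \ V0) := by
      ext q
      simp only [Finset.mem_sdiff, Finset.mem_insert]
      constructor
      · rintro ⟨h | h, hv⟩
        · exact Or.inl h
        · exact Or.inr ⟨h, hv⟩
      · rintro (rfl | ⟨h, hv⟩)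
        · exact ⟨Or.inl rfl, hcV0⟩
        · exact ⟨Or.inr h, hv⟩
    refine ⟨h1.trans (Finset.subset_insert _ _), Finset.mem_insert_of_mem h2, ?_, ?_, ?_, ?_, ?_⟩
    · intro q hq
      rcases List.mem_cons.mp hq with rfl | hq
      · exact Finset.mem_insert_self _ _
      · exact Finset.mem_insert_of_mem (h3 q hq)
    · intro q hq
      rcases List.mem_cons.mp hq with rfl | hq
      · exact hReachc
      · exact h4 q hq
    · intro q hq hqV0
      rcases Finset.mem_insert.mp hq with rfl | hq
      · exact hReachc
      · exact h5 q hq hqV0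
    · simp only [hsd, Finset.card_insert_of_notMem (fun hcm => hnv (Finset.mem_sdiff.mp hcm).1),
        h6]
      push_cast
      ring
    · simp only [hsd, Finset.image_insert, h7]
  · exact ⟨h1, h2, h3, h4, h5, h6, h7⟩

theorem dfsLoop_nil {land : List (List Int)} {n m : Int} {s : DState} (h : s.stack = []) :
    dfsLoop land n m s = s := by
  rw [dfsLoop.eq_def]
  split <;> simp_all

theorem dfsLoop_cons {land : List (List Int)} {n m : Int} {s : DState} {c : Int × Int}
    {rest : List (Int × Int)} (h : s.stack = c :: rest) :
    dfsLoop land n m s =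
      dfsLoop land n m
        (dfsStep land n m
          (dfsStep land n m
            (dfsStep land n m
              (dfsStep land n m ⟨s.visited, rest, s.cnt, s.col⟩ (c.1, c.2 + 1))
              (c.1, c.2 - 1))
            (c.1 + 1, c.2))
          (c.1 - 1, c.2)) := by
  rw [dfsLoop.eq_def]
  split
  · simp_all
  · rename_i c' rest' h'
    rw [h] at h'
    cases h'
    rfl

theorem dfsLoop_spec_aux {land : List (List Int)} {n m : Int} {V0 : Finset (Int × Int)}
    {seed : Int × Int} (Hdisj : ∀ q, Reach land n m seed q → q ∉ V0)
    (hOil : Oil land n m seed) :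
    ∀ (N : Nat) (s : DState), dMu n m s ≤ N → DCore land n m V0 seed s →
      DClosed land n m V0 s →
      DCore land n m V0 seed (dfsLoop land n m s) ∧
        DClosed land n m V0 (dfsLoop land n m s) ∧
        (dfsLoop land n m s).stack = [] ∧ s.visited ⊆ (dfsLoop land n m s).visited := by
  intro N
  induction N with
  | zero =>
    intro s hmu hcore hclosed
    have hnil : s.stack = [] := by
      cases h : s.stack with
      | nil => rfl
      | cons a l => rw [dMu, h] at hmu; simp at hmu
    rw [dfsLoop_nil hnil]
    exact ⟨hcore, hclosed, hnil, Finset.Subset.refl _⟩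
  | succ N IH =>
    intro s hmu hcore hclosed
    cases hstack : s.stack with
    | nil =>
      rw [dfsLoop_nil hstack]
      exact ⟨hcore, hclosed, hstack, Finset.Subset.refl _⟩
    | cons c rest =>
      obtain ⟨h1, h2, h3, h4, h5, h6, h7⟩ := hcore
      have hreach_c : Reach land n m seed c := h4 c (by rw [hstack]; exact List.mem_cons_self)
      set s0 : DState := ⟨s.visited, rest, s.cnt, s.col⟩ with hs0
      have hcore0 : DCore land n m V0 seed s0 :=
        ⟨h1, h2, fun q hq => h3 q (by rw [hstack]; exact List.mem_cons_of_mem _ hq),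
          fun q hq => h4 q (by rw [hstack]; exact List.mem_cons_of_mem _ hq), h5, h6, h7⟩
      have hn1 : (c.1, c.2 + 1) ∈ nbrs4 c := by simp [nbrs4]
      have hn2 : (c.1, c.2 - 1) ∈ nbrs4 c := by simp [nbrs4]
      have hn3 : (c.1 + 1, c.2) ∈ nbrs4 c := by simp [nbrs4]
      have hn4 : (c.1 - 1, c.2) ∈ nbrs4 c := by simp [nbrs4]
      set s1 := dfsStep land n m s0 (c.1, c.2 + 1) with hs1
      set s2 := dfsStep land n m s1 (c.1, c.2 - 1) with hs2
      set s3 := dfsStep land n m s2 (c.1 + 1, c.2) with hs3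
      set s4 := dfsStep land n m s3 (c.1 - 1, c.2) with hs4
      have hcore1 := dfsStep_core Hdisj hOil hcore0 hreach_c hn1
      have hcore2 := dfsStep_core Hdisj hOil hcore1 hreach_c hn2
      have hcore3 := dfsStep_core Hdisj hOil hcore2 hreach_c hn3
      have hcore4 := dfsStep_core Hdisj hOil hcore3 hreach_c hn4
      have hv01 := dfsStep_visited_mono land n m s0 (c.1, c.2 + 1)
      have hv12 := dfsStep_visited_mono land n m s1 (c.1, c.2 - 1)
      have hv23 := dfsStep_visited_mono land n m s2 (c.1 + 1, c.2)
      have hv34 := dfsStep_visited_mono land n m s3 (c.1 - 1, c.2)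
      have hv04 : s.visited ⊆ s4.visited := fun q hq => hv34 (hv23 (hv12 (hv01 hq)))
      have hk01 := dfsStep_stack_mono land n m s0 (c.1, c.2 + 1)
      have hk12 := dfsStep_stack_mono land n m s1 (c.1, c.2 - 1)
      have hk23 := dfsStep_stack_mono land n m s2 (c.1 + 1, c.2)
      have hk34 := dfsStep_stack_mono land n m s3 (c.1 - 1, c.2)
      have hk04 : ∀ q ∈ rest, q ∈ s4.stack :=
        fun q hq => hk34 q (hk23 q (hk12 q (hk01 q hq)))
      have htrack : ∀ q ∈ s4.visited, q ∈ s.visited ∨ q ∈ s4.stack := by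
        intro q hq
        rcases dfsStep_track land n m s3 (c.1 - 1, c.2) q hq with hq | hq
        · rcases dfsStep_track land n m s2 (c.1 + 1, c.2) q hq with hq | hq
          · rcases dfsStep_track land n m s1 (c.1, c.2 - 1) q hq with hq | hq
            · rcases dfsStep_track land n m s0 (c.1, c.2 + 1) q hq with hq | hq
              · exact Or.inl hq
              · exact Or.inr (hk34 q (hk23 q (hk12 q hq)))
            · exact Or.inr (hk34 q (hk23 q hq))
          · exact Or.inr (hk34 q hq)
        · exact Or.inr hq
      have hclosed4 : DClosed land n m V0 s4 := by
        intro q hqvis hqV0 hqstk r hOilr hrnbr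
        rcases htrack q hqvis with hqs | hqs
        swap
        · exact absurd hqs hqstk
        by_cases hqc : q = c
        · subst hqc
          simp only [nbrs4, List.mem_cons, List.not_mem_nil, or_false] at hrnbr
          rcases hrnbr with rfl | rfl | rfl | rfl
          · exact hv34 (hv23 (hv12 (dfsStep_nbr_in land n m s0 _ hOilr)))
          · exact hv34 (hv23 (dfsStep_nbr_in land n m s1 _ hOilr))
          · exact hv34 (dfsStep_nbr_in land n m s2 _ hOilr)
          · exact dfsStep_nbr_in land n m s3 _ hOilr
        · have hqrest : q ∉ rest := fun hqr => hqstk (hk04 q hqr)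
          have hqst : q ∉ s.stack := by rw [hstack]; simp [hqc, hqrest]
          exact hv04 (hclosed q hqs hqV0 hqst r hOilr hrnbr)
      have hmu4 : dMu n m s4 ≤ N := by
        have e1 := dfsStep_mu land n m s0 (c.1, c.2 + 1)
        have e2 := dfsStep_mu land n m s1 (c.1, c.2 - 1)
        have e3 := dfsStep_mu land n m s2 (c.1 + 1, c.2)
        have e4 := dfsStep_mu land n m s3 (c.1 - 1, c.2)
        rw [← hs1] at e1
        rw [← hs2] at e2
        rw [← hs3] at e3
        rw [← hs4] at e4
        have hms : dMu n m s = dMu n m s0 + 1 := by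
          rw [dMu, dMu, hstack, hs0]
          simp
          omega
        omega
      rw [dfsLoop_cons hstack, ← hs0, ← hs1, ← hs2, ← hs3, ← hs4]
      obtain ⟨ca, cb, cc, cd⟩ := IH s4 hmu4 hcore4 hclosed4
      exact ⟨ca, cb, cc, hv04.trans cd⟩

theorem dfsLoop_spec {land : List (List Int)} {n m : Int} {V0 : Finset (Int × Int)}
    {seed : Int × Int} (Hdisj : ∀ q, Reach land n m seed q → q ∉ V0)
    (hOil : Oil land n m seed) (s : DState) (hcore : DCore land n m V0 seed s)
    (hclosed : DClosed land n m V0 s) :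
    DCore land n m V0 seed (dfsLoop land n m s) ∧
      DClosed land n m V0 (dfsLoop land n m s) ∧
      (dfsLoop land n m s).stack = [] ∧ s.visited ⊆ (dfsLoop land n m s).visited :=
  dfsLoop_spec_aux Hdisj hOil (dMu n m s) s le_rfl hcore hclosed

-- the run of A's flood fill from a fresh seed: its marked region is exactly V0 plus the
-- Reach-component of the seed, with the matching count and column set
theorem dfs_run {land : List (List Int)} {n m : Int} {V0 : Finset (Int × Int)}
    {seed : Int × Int} (Hdisj : ∀ q, Reach land n m seed q → q ∉ V0)
    (hOil : Oil land n m seed) :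
    let f := dfsLoop land n m ⟨insert seed V0, [seed], 1, {seed.2}⟩
    (∀ q, q ∈ f.visited ↔ (q ∈ V0 ∨ Reach land n m seed q)) ∧
      f.cnt = ((f.visited \ V0).card : Int) ∧ f.col = (f.visited \ V0).image Prod.snd := by
  intro f
  have hseedV0 : seed ∉ V0 := Hdisj seed Relation.ReflTransGen.refl
  have hsd : insert seed V0 \ V0 = {seed} := by
    ext q
    simp only [Finset.mem_sdiff, Finset.mem_insert, Finset.mem_singleton]
    constructor
    · rintro ⟨rfl | h, hv⟩
      · rfl
      · exact absurd h hv
    · rintro rfl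
      exact ⟨Or.inl rfl, hseedV0⟩
  have hcore : DCore land n m V0 seed ⟨insert seed V0, [seed], 1, {seed.2}⟩ := by
    refine ⟨Finset.subset_insert _ _, Finset.mem_insert_self _ _, ?_, ?_, ?_, ?_, ?_⟩
    · intro q hq
      rcases List.mem_singleton.mp hq with rfl
      exact Finset.mem_insert_self _ _
    · intro q hq
      rcases List.mem_singleton.mp hq with rfl
      exact Relation.ReflTransGen.refl
    · intro q hq hqV0
      rcases Finset.mem_insert.mp hq with rfl | hq
      · exact Relation.ReflTransGen.refl
      · exact absurd hq hqV0
    · simp [hsd]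
    · simp [hsd]
  have hclosed : DClosed land n m V0 ⟨insert seed V0, [seed], 1, {seed.2}⟩ := by
    intro q hq hqV0 hqstk
    rcases Finset.mem_insert.mp hq with rfl | hq
    · exact absurd (List.mem_singleton.mpr rfl) hqstk
    · exact absurd hq hqV0
  obtain ⟨⟨c1, c2, c3, c4, c5, c6, c7⟩, hcl, hemp, hmono⟩ :=
    dfsLoop_spec Hdisj hOil _ hcore hclosed
  refine ⟨?_, c6, c7⟩
  intro q
  constructor
  · intro hq
    by_cases hqV0 : q ∈ V0
    · exact Or.inl hqV0
    · exact Or.inr (c5 q hq hqV0)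
  · rintro (hq | hq)
    · exact c1 hq
    · have := reach_in_closed (land := land) (n := n) (m := m)
        (T := fun z => z ∈ f.visited ∧ Reach land n m seed z)
        ⟨c2, Relation.ReflTransGen.refl⟩ ?_ hq
      · exact this.1
      · rintro a ⟨haf, har⟩ b hedge
        refine ⟨?_, har.tail hedge⟩
        have hastk : a ∉ f.stack := by rw [hemp]; exact List.not_mem_nil
        exact hcl a haf (Hdisj a har) hastk b hedge.2.1 hedge.2.2

-- ---- B's closure: invariants of the frontier loop ----
def CInv (land : List (List Int)) (n m : Int) (seed : Int × Int)
    (comp frontier : Finset (Int × Int)) : Prop :=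
  frontier ⊆ comp ∧ seed ∈ comp ∧ (∀ q ∈ comp, Reach land n m seed q) ∧
  (∀ q ∈ comp, q ∉ frontier → ∀ r, Oil land n m r → r ∈ nbrs4 q → r ∈ comp)

theorem closeLoop_spec {land : List (List Int)} {n m : Int} {seed : Int × Int}
    (hOil : Oil land n m seed) :
    ∀ (fuel : Nat) (comp frontier : Finset (Int × Int)), CInv land n m seed comp frontier →
      (gridCells n m \ comp).card ≤ fuel →
      seed ∈ closeLoop land n m fuel comp frontier ∧
        (∀ q ∈ closeLoop land n m fuel comp frontier, Reach land n m seed q) ∧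
        (∀ q ∈ closeLoop land n m fuel comp frontier,
          ∀ r, Oil land n m r → r ∈ nbrs4 q → r ∈ closeLoop land n m fuel comp frontier) := by
  intro fuel
  induction fuel with
  | zero =>
    intro comp frontier hinv hcard
    obtain ⟨hfc, hseed, hreach, hclosed⟩ := hinv
    have hgrid : gridCells n m ⊆ comp := by
      intro x hx
      by_contra hxc
      have : x ∈ gridCells n m \ comp := Finset.mem_sdiff.mpr ⟨hx, hxc⟩
      have := Finset.card_pos.mpr ⟨x, this⟩
      omega
    exact ⟨hseed, hreach, fun q _ r hOilr _ => hgrid (oil_mem_grid hOilr)⟩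
  | succ fuel IH =>
    intro comp frontier hinv hcard
    obtain ⟨hfc, hseed, hreach, hclosed⟩ := hinv
    rw [closeLoop]
    by_cases hfr : frontier = ∅
    · rw [if_pos hfr]
      refine ⟨hseed, hreach, fun q hq r hOilr hrnbr => ?_⟩
      exact hclosed q hq (by rw [hfr]; exact Finset.notMem_empty q) r hOilr hrnbr
    · rw [if_neg hfr]
      set nw := (frontier.biUnion fun p => (nbrsOil land n m p).toFinset) \ comp with hnw
      have hnbr_mem : ∀ q ∈ frontier, ∀ r, Oil land n m r → r ∈ nbrs4 q →
          r ∈ comp ∪ nw := by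
        intro q hq r hOilr hrnbr
        by_cases hrc : r ∈ comp
        · exact Finset.mem_union_left _ hrc
        · refine Finset.mem_union_right _ ?_
          rw [hnw]
          refine Finset.mem_sdiff.mpr ⟨Finset.mem_biUnion.mpr ⟨q, hq, ?_⟩, hrc⟩
          exact List.mem_toFinset.mpr (mem_nbrsOil.mpr ⟨hrnbr, hOilr⟩)
      have hclosed' : ∀ q ∈ comp ∪ nw, q ∉ nw → ∀ r, Oil land n m r → r ∈ nbrs4 q →
          r ∈ comp ∪ nw := by
        intro q hq hqnw r hOilr hrnbr
        rcases Finset.mem_union.mp hq with hq | hq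
        · by_cases hqf : q ∈ frontier
          · exact hnbr_mem q hqf r hOilr hrnbr
          · exact Finset.mem_union_left _ (hclosed q hq hqf r hOilr hrnbr)
        · exact absurd hq hqnw
      by_cases hnwe : nw = ∅
      · have hres : closeLoop land n m fuel (comp ∪ nw) nw = comp ∪ nw := by
          rw [hnwe]
          cases fuel <;> simp [closeLoop]
        rw [hres]
        refine ⟨Finset.mem_union_left _ hseed, ?_, ?_⟩
        · intro q hq
          rw [hnwe, Finset.union_empty] at hq
          exact hreach q hq
        · intro q hq r hOilr hrnbr
          exact hclosed' q hq (by rw [hnwe]; exact Finset.notMem_empty q) r hOilr hrnbr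
      · have hOilseed := hOil
        have hreach' : ∀ q ∈ comp ∪ nw, Reach land n m seed q := by
          intro q hq
          rcases Finset.mem_union.mp hq with hq | hq
          · exact hreach q hq
          · rw [hnw] at hq
            obtain ⟨hqb, hqc⟩ := Finset.mem_sdiff.mp hq
            obtain ⟨p, hp, hqp⟩ := Finset.mem_biUnion.mp hqb
            obtain ⟨hqnbr, hqOil⟩ := mem_nbrsOil.mp (List.mem_toFinset.mp hqp)
            exact (hreach p (hfc hp)).tail
              ⟨reach_oil hOil (hreach p (hfc hp)), hqOil, hqnbr⟩
        have hinv' : CInv land n m seed (comp ∪ nw) nw :=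
          ⟨Finset.subset_union_right, Finset.mem_union_left _ hseed, hreach', hclosed'⟩
        have hcard' : (gridCells n m \ (comp ∪ nw)).card ≤ fuel := by
          obtain ⟨x, hx⟩ := Finset.nonempty_iff_ne_empty.mpr hnwe
          have hxg : x ∈ gridCells n m := by
            rw [hnw] at hx
            obtain ⟨hxb, -⟩ := Finset.mem_sdiff.mp hx
            obtain ⟨p, hp, hxp⟩ := Finset.mem_biUnion.mp hxb
            exact oil_mem_grid (mem_nbrsOil.mp (List.mem_toFinset.mp hxp)).2
          have hxc : x ∉ comp := (Finset.mem_sdiff.mp (hnw ▸ hx)).2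
          have hsub : gridCells n m \ (comp ∪ nw) ⊆ (gridCells n m \ comp).erase x := by
            intro y hy
            obtain ⟨hyg, hyc⟩ := Finset.mem_sdiff.mp hy
            refine Finset.mem_erase.mpr ⟨?_, Finset.mem_sdiff.mpr
              ⟨hyg, fun hc => hyc (Finset.mem_union_left _ hc)⟩⟩
            rintro rfl
            exact hyc (Finset.mem_union_right _ hx)
          have := Finset.card_le_card hsub
          have hxmem : x ∈ gridCells n m \ comp := Finset.mem_sdiff.mpr ⟨hxg, hxc⟩
          have := Finset.card_erase_of_mem hxmem
          have := Finset.card_pos.mpr ⟨x, hxmem⟩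
          omega
        exact IH (comp ∪ nw) nw hinv' hcard'

theorem bClosure_char {land : List (List Int)} {n m : Int} {seed : Int × Int}
    (hOil : Oil land n m seed) :
    ∀ q, q ∈ bClosure land n m seed ↔ Reach land n m seed q := by
  have hinv : CInv land n m seed {seed} {seed} := by
    refine ⟨Finset.Subset.refl _, Finset.mem_singleton_self _, ?_, ?_⟩
    · intro q hq
      rcases Finset.mem_singleton.mp hq with rfl
      exact Relation.ReflTransGen.refl
    · intro q hq hqf
      exact absurd hq hqf
  have hcard : (gridCells n m \ ({seed} : Finset (Int × Int))).card ≤ n.toNat * m.toNat + 1 := by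
    have h1 : (gridCells n m \ ({seed} : Finset (Int × Int))).card ≤ (gridCells n m).card :=
      Finset.card_le_card Finset.sdiff_subset
    have h2 : (gridCells n m).card ≤ n.toNat * m.toNat := by
      calc (gridCells n m).card
          ≤ ((Finset.range n.toNat) ×ˢ (Finset.range m.toNat)).card :=
            Finset.card_image_le
        _ = n.toNat * m.toNat := by simp [Finset.card_product]
    omega
  obtain ⟨hseedR, hreachR, hclosedR⟩ := closeLoop_spec hOil (n.toNat * m.toNat + 1)
    {seed} {seed} hinv hcard
  intro q
  constructor
  · exact hreachR q
  · intro hq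
    exact reach_in_closed (T := fun z => z ∈ bClosure land n m seed) hseedR
      (fun a ha b hedge => hclosedR a ha b hedge.2.1 hedge.2.2) hq

-- ---- the two outer scans, in lockstep ----
def applyAll (m : Int) (comps : List (Int × Finset Int)) : List Int :=
  comps.foldl (fun a sc => addCols a sc.1 sc.2) (List.replicate m.toNat 0)

def ScanInv (land : List (List Int)) (n m : Int) (stA : Finset (Int × Int) × List Int)
    (stB : Finset (Int × Int) × List (Int × Finset Int)) : Prop :=
  stA.1 = stB.1 ∧ stA.2 = applyAll m stB.2 ∧
  (∀ p ∈ stA.1, ∀ q, Edge land n m p q → q ∈ stA.1) ∧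
  (∀ sc ∈ stB.2, ∀ c ∈ sc.2, 0 ≤ c ∧ c < m)

theorem scan_step {land : List (List Int)} {n m : Int} (ij : Int × Int)
    (hin : inR n m ij.1 ij.2 = true) {stA : Finset (Int × Int) × List Int}
    {stB : Finset (Int × Int) × List (Int × Finset Int)} (h : ScanInv land n m stA stB) :
    ScanInv land n m (aStep land n m stA ij) (bStep land n m stB ij) := by
  obtain ⟨hV, hAns, hCl, hCols⟩ := h
  by_cases hc : landAt land ij.1 ij.2 = 1 ∧ ij ∉ stB.1
  · have hcA : ij ∉ stA.1 ∧ landAt land ij.1 ij.2 = 1 := ⟨by rw [hV]; exact hc.2, hc.1⟩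
    rw [aStep, if_pos hcA, bStep, if_pos hc]
    have hOil : Oil land n m ij := ⟨hin, by rw [hc.1]; exact one_ne_zero⟩
    have Hdisj : ∀ q, Reach land n m ij q → q ∉ stA.1 := by
      intro q hR hqin
      have hij : ij ∈ stA.1 := reach_in_closed (T := fun z => z ∈ stA.1) hqin
        (fun a ha b he => hCl a ha b he) (reach_symm hR)
      exact hc.2 (hV ▸ hij)
    obtain ⟨hchar, hcnt, hcol⟩ := dfs_run (V0 := stA.1) Hdisj hOil
    have hK : ∀ q, q ∈ bClosure land n m ij ↔ Reach land n m ij q := bClosure_char hOil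
    set f := dfsLoop land n m ⟨insert ij stA.1, [ij], 1, {ij.2}⟩ with hf
    set K := bClosure land n m ij with hKdef
    have key : f.visited \ stA.1 = K := by
      ext q
      simp only [Finset.mem_sdiff, hchar q, hK q]
      constructor
      · rintro ⟨hq | hq, hnq⟩
        · exact absurd hq hnq
        · exact hq
      · intro hR
        exact ⟨Or.inr hR, Hdisj q hR⟩
    refine ⟨?_, ?_, ?_, ?_⟩
    · show f.visited = stB.1 ∪ K
      ext q
      rw [hchar q, Finset.mem_union, hK q, hV]
    · show addCols stA.2 f.cnt f.col = applyAll m (stB.2 ++ [((K.card : Int), K.image Prod.snd)])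
      rw [applyAll, List.foldl_append]
      have : stB.2.foldl (fun a sc => addCols a sc.1 sc.2) (List.replicate m.toNat 0)
          = applyAll m stB.2 := rfl
      rw [this, ← hAns, hcnt, hcol, key]
      simp
    · show ∀ p ∈ f.visited, ∀ q, Edge land n m p q → q ∈ f.visited
      intro p hp q hedge
      rcases (hchar p).mp hp with hpA | hpR
      · exact (hchar q).mpr (Or.inl (hCl p hpA q hedge))
      · exact (hchar q).mpr (Or.inr (hpR.tail hedge))
    · show ∀ sc ∈ stB.2 ++ [((K.card : Int), K.image Prod.snd)], ∀ c ∈ sc.2, 0 ≤ c ∧ c < m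
      intro sc hsc c hcsc
      rcases List.mem_append.mp hsc with hsc | hsc
      · exact hCols sc hsc c hcsc
      · rcases List.mem_singleton.mp hsc with rfl
        obtain ⟨q, hqK, rfl⟩ := Finset.mem_image.mp hcsc
        have hOilq : Oil land n m q := reach_oil hOil ((hK q).mp hqK)
        have := hOilq.1
        simp only [inR, Bool.and_eq_true, decide_eq_true_eq] at this
        obtain ⟨⟨⟨-, -⟩, h3⟩, h4⟩ := this
        exact ⟨h3, h4⟩
  · have hcA : ¬ (ij ∉ stA.1 ∧ landAt land ij.1 ij.2 = 1) := by
      rintro ⟨ha, hb⟩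
      exact hc ⟨hb, by rw [← hV]; exact ha⟩
    rw [aStep, if_neg hcA, bStep, if_neg hc]
    exact ⟨hV, hAns, hCl, hCols⟩

theorem scan_inv (land : List (List Int)) (n m : Int) :
    ∀ (cells : List (Int × Int)), (∀ ij ∈ cells, inR n m ij.1 ij.2 = true) →
      ∀ stA stB, ScanInv land n m stA stB →
        ScanInv land n m (cells.foldl (aStep land n m) stA) (cells.foldl (bStep land n m) stB) := by
  intro cells
  induction cells with
  | nil => exact fun _ _ _ h => h
  | cons ij cells ihc =>
    intro hin stA stB h
    simp only [List.foldl_cons]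
    exact ihc (fun p hp => hin p (List.mem_cons_of_mem _ hp)) _ _
      (scan_step ij (hin ij List.mem_cons_self) h)

-- ---- turning A's incremental answer array into B's per-column sums ----
theorem pySetD_map_range (m : Int) (f : Int → Int) (c v : Int) (h0 : 0 ≤ c) (h1 : c < m) :
    PySem.List.pySetD ((PySem.List.pyRange 0 m 1).map f) c v
      = (PySem.List.pyRange 0 m 1).map (fun x => if x = c then v else f x) := by
  have hc : c = ((c.toNat : Nat) : Int) := by omega
  have hlen : c.toNat < ((PySem.List.pyRange 0 m 1).map f).length := by
    simp [PySem.List.length_pyRange_one]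
    omega
  rw [hc, PySem.List.pySetD, PySem.List.pySet?_natCast _ _ _ hlen, Option.getD_some]
  apply List.ext_getElem
  · simp
  · intro k h1 h2
    simp only [List.getElem_set, List.getElem_map, PySem.List.getElem_pyRange_one]
    have h3 : k < (m - 0).toNat := by
      simpa [PySem.List.length_pyRange_one] using h2
    split_ifs with ha hb hb
    · rfl
    · exact absurd (by omega : (0 : Int) + k = ↑c.toNat) hb
    · exact absurd (by omega : c.toNat = k) ha
    · rfl

theorem setfold (m : Int) (cnt : Int) :
    ∀ (cs : List Int), cs.Nodup → (∀ c ∈ cs, 0 ≤ c ∧ c < m) → ∀ f : Int → Int,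
      cs.foldl (fun a c => PySem.List.pySetD a c (PySem.List.pyGetD a c 0 + cnt))
          ((PySem.List.pyRange 0 m 1).map f)
        = (PySem.List.pyRange 0 m 1).map (fun x => f x + if x ∈ cs then cnt else 0) := by
  intro cs
  induction cs with
  | nil => intro _ _ f; simp
  | cons c cs ihc =>
    intro hnd hrange f
    have hc := hrange c List.mem_cons_self
    simp only [List.foldl_cons]
    rw [PySem.List.pyGetD_map_pyRange_of_nonneg _ _ _ _ hc.1 hc.2,
      pySetD_map_range m f c (f c + cnt) hc.1 hc.2,
      ihc (List.Nodup.of_cons hnd) (fun x hx => hrange x (List.mem_cons_of_mem _ hx))]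
    apply List.map_congr_left
    intro x hx
    rw [PySem.List.mem_pyRange_one] at hx
    by_cases hxc : x = c
    · subst hxc
      have : x ∉ cs := (List.nodup_cons.mp hnd).1
      simp [this]
    · simp [hxc]

theorem addCols_map (m : Int) (f : Int → Int) (cnt : Int) (cols : Finset Int)
    (h : ∀ c ∈ cols, 0 ≤ c ∧ c < m) :
    addCols ((PySem.List.pyRange 0 m 1).map f) cnt cols
      = (PySem.List.pyRange 0 m 1).map (fun c => f c + if c ∈ cols then cnt else 0) := by
  rw [addCols, setfold m cnt (cols.sort (· ≤ ·)) (Finset.sort_nodup _ _)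
    (fun c hc => h c ((Finset.mem_sort _).mp hc))]
  apply List.map_congr_left
  intro x _
  simp [Finset.mem_sort]

theorem applyAll_eq (m : Int) :
    ∀ (comps : List (Int × Finset Int)), (∀ sc ∈ comps, ∀ c ∈ sc.2, 0 ≤ c ∧ c < m) →
      applyAll m comps = (PySem.List.pyRange 0 m 1).map
        (fun c => (comps.map (fun sc => if c ∈ sc.2 then sc.1 else 0)).sum) := by
  intro comps
  induction comps using List.reverseRecOn with
  | nil =>
    intro _
    rw [applyAll]
    simp only [List.foldl_nil, List.map_nil, List.sum_nil]
    rw [PySem.List.pyRange_one, List.map_map]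
    rw [show ((fun _ : Int => (0 : Int)) ∘ fun k : Nat => 0 + (k : Int)) = fun _ => (0 : Int)
      from rfl]
    rw [List.map_const', List.length_range]
    simp
  | append_singleton l sc ih =>
    intro h
    have hl : ∀ x ∈ l, ∀ c ∈ x.2, 0 ≤ c ∧ c < m :=
      fun x hx => h x (List.mem_append_left _ hx)
    have hsc : ∀ c ∈ sc.2, 0 ≤ c ∧ c < m :=
      h sc (List.mem_append_right _ (List.mem_singleton.mpr rfl))
    rw [applyAll, List.foldl_append]
    have : l.foldl (fun a x => addCols a x.1 x.2) (List.replicate m.toNat 0) = applyAll m l := rfl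
    rw [this, ih hl]
    simp only [List.foldl_cons, List.foldl_nil]
    rw [addCols_map m _ sc.1 sc.2 hsc]
    apply List.map_congr_left
    intro x _
    simp

theorem cellsOf_inR (n m : Int) : ∀ ij ∈ cellsOf n m, inR n m ij.1 ij.2 = true := by
  intro ij hij
  simp only [cellsOf, List.mem_flatMap, List.mem_map] at hij
  obtain ⟨i, hi, j, hj, rfl⟩ := hij
  rw [PySem.List.mem_pyRange_one] at hi hj
  simp [inR]; omega

-- ===== VERDICT (by name: the statement is the Claim_ definition above) =====
theorem solution_spec : Claim_equal_solution := by
  intro land _hdom _hpre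
  show solution land = solution_alt land
  rw [solution, solution_alt]
  have hscan := scan_inv land (land.length : Int) ((PySem.List.pyGetD land 0 []).length : Int)
    (cellsOf _ _) (cellsOf_inR _ _)
    (∅, List.replicate ((PySem.List.pyGetD land 0 []).length : Int).toNat 0) (∅, [])
    ⟨rfl, rfl, by simp, by simp⟩
  obtain ⟨g1, g2, g3, g4⟩ := hscan
  rw [g2, applyAll_eq _ _ g4]
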